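-- pv_equiv track=rewrite | github.com/niftools/pyffi | pyffi/formats/kfm/__init__.py | versionNumber
-- ===== SOURCE A (Python) =====
-- def versionNumber(version_str):
--     """Converts version string into an integer.
--
--     :param version_str: The version string.
--     :type version_str: str
--     :return: A version integer.
--
--     >>> hex(KfmFormat.versionNumber('1.0'))
--     '0x1000000'
--     >>> hex(KfmFormat.versionNumber('1.2.4b'))
--     '0x1024b00'
--     >>> hex(KfmFormat.versionNumber('2.2.0.0b'))
--     '0x202000b'
--     """
--
--     if not '.' in version_str:
--         return int(version_str)
--
--     try:
--         ver_list = [int(x, 16) for x in version_str.split('.')]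
--     except ValueError:
--         # version not supported (i.e. version_str '10.0.1.3z' would
--         # trigger this)
--         return -1
--     if len(ver_list) > 4 or len(ver_list) < 1:
--         # version not supported
--         return -1
--     for ver_digit in ver_list:
--         if (ver_digit | 0xff) > 0xff:
--             return -1 # version not supported
--     while len(ver_list) < 4:
--         ver_list.append(0)
--     return ((ver_list[0] << 24)
--             + (ver_list[1] << 16)
--             + (ver_list[2] << 8)
--             + ver_list[3])
-- ===== SOURCE B (Python) =====
-- def versionNumber(version_str):
--     """Converts version string into an integer (single fused pass)."""
--     if '.' not in version_str:
--         return int(version_str)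
--     fields = version_str.split('.')
--     if not 1 <= len(fields) <= 4:
--         return -1
--     acc = 0
--     for x in fields:
--         try:
--             v = int(x, 16)
--         except ValueError:
--             return -1
--         if (v | 0xff) > 0xff:
--             return -1
--         acc = (acc << 8) + v
--     return acc << (8 * (4 - len(fields)))
-- ===== Notes on version B (the rewrite author's own statement) =====
-- stated objective: simpler
-- what changed: Replaces A's four passes (parse-all comprehension, length check, per-digit validation loop, while-loop padding plus a fixed four-index shifted sum) with a length check and one fused loop that parses, validates and accumulates acc=(acc<<8)+v, closed by a single shift into the high bytes.
import Mathlib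
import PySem

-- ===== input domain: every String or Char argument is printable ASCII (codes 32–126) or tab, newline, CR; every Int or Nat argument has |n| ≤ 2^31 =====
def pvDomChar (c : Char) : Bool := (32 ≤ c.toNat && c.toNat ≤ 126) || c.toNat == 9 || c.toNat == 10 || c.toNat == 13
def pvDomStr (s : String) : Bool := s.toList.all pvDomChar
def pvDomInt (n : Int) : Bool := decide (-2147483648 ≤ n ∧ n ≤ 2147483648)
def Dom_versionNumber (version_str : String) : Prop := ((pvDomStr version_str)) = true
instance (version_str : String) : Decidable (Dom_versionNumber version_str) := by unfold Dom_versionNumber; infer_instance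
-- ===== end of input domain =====

-- B replaces A's four passes (parse-all comprehension, length check, validation loop,
-- padding loop + fixed-index sum) by a length check and ONE fused loop that parses,
-- validates and accumulates (acc<<8)+v, closed by a single shift (objective: simpler).

-- ===== PORT A =====
-- '[int(x, 16) for x in version_str.split('.')]'; ValueError (none) aborts the comprehension
def pvParseHexA : List String → Option (List Int)
  | [] => some []
  | x :: rest =>
    match PySem.Int.ofStrBase? x 16 with
    | none => none
    | some v =>
      match pvParseHexA rest with
      | none => none
      | some vs => some (v :: vs)

-- 'for ver_digit in ver_list: if (ver_digit | 0xff) > 0xff: return -1'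
def pvBadDigitA : List Int → Bool
  | [] => false
  | d :: rest => if 255 < Int.lor d 255 then true else pvBadDigitA rest

-- 'while len(ver_list) < 4: ver_list.append(0)'
def pvPadA (l : List Int) : List Int :=
  if l.length < 4 then pvPadA (l ++ [0]) else l
  termination_by 4 - l.length
  decreasing_by simp; omega

def versionNumber (version_str : String) : Int :=
  if !(PySem.Str.isIn "." version_str) then
    -- int(version_str); Pre_ excludes the ValueError case (ofStr? = none)
    (PySem.Int.ofStr? version_str).getD 0
  else
    -- sep "." is nonempty, so split? never returns none
    match pvParseHexA ((PySem.Str.split? version_str ".").getD []) with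
    | none => -1
    | some ver_list =>
      if ver_list.length > 4 || ver_list.length < 1 then -1
      else if pvBadDigitA ver_list then -1
      else
        let padded := pvPadA ver_list
        -- after padding the length is exactly 4, so indices 0..3 never raise
        (padded.getD 0 0) <<< (24:Nat) + (padded.getD 1 0) <<< (16:Nat)
          + (padded.getD 2 0) <<< (8:Nat) + padded.getD 3 0

-- ===== PORT B =====
-- 'for x in fields: try v=int(x,16) except ValueError: return -1;
--  if (v|0xff)>0xff: return -1; acc = (acc<<8)+v'  (none = the early 'return -1')
def pvAccLoopB : List String → Int → Option Int
  | [], acc => some acc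
  | x :: rest, acc =>
    match PySem.Int.ofStrBase? x 16 with
    | none => none
    | some v =>
      if 255 < Int.lor v 255 then none
      else pvAccLoopB rest ((acc <<< (8:Nat)) + v)

def versionNumber_alt (version_str : String) : Int :=
  if !(PySem.Str.isIn "." version_str) then
    (PySem.Int.ofStr? version_str).getD 0
  else
    -- sep "." is nonempty, so split? never returns none
    let fields := (PySem.Str.split? version_str ".").getD []
    if !(1 ≤ fields.length && fields.length ≤ 4) then -1
    else
      match pvAccLoopB fields 0 with
      | none => -1
      | some acc => acc <<< (8 * (4 - fields.length))

-- ===== PRECONDITION & SPEC =====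
-- Pre_ excludes only the inputs on which A RAISES ValueError: no '.' and not parseable by int()
def Pre_versionNumber (version_str : String) : Prop :=
  PySem.Str.isIn "." version_str = true ∨ (PySem.Int.ofStr? version_str).isSome = true
instance (version_str : String) : Decidable (Pre_versionNumber version_str) := by
  unfold Pre_versionNumber; infer_instance
def pvWitness_versionNumber : String := "1.2.4b"

def Spec_versionNumber (version_str : String) (out : Int) : Prop := out = versionNumber_alt version_str
instance (version_str : String) (out : Int) : Decidable (Spec_versionNumber version_str out) := by
  unfold Spec_versionNumber; infer_instance

-- ===== CLAIM (what is proved, stated in full; the proofs are below) =====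
def Claim_equal_versionNumber : Prop := ∀ (version_str : String), Dom_versionNumber version_str → Pre_versionNumber version_str → Spec_versionNumber version_str (versionNumber version_str)

-- ===== LEMMAS AND PROOFS =====

-- a successful parse keeps the length
theorem pvParseHexA_length (fields : List String) (vl : List Int)
    (h : pvParseHexA fields = some vl) : vl.length = fields.length := by
  induction fields generalizing vl with
  | nil => simp [pvParseHexA] at h; simp [← h]
  | cons x rest ih =>
    simp only [pvParseHexA] at h
    cases hx : PySem.Int.ofStrBase? x 16 with
    | none => simp [hx] at h
    | some v =>
      cases hr : pvParseHexA rest with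
      | none => simp [hx, hr] at h
      | some vs =>
        simp [hx, hr] at h
        simp [← h, List.length_cons, ih vs hr]

-- B's fused loop = A's parse-then-validate followed by a plain left fold
theorem pvAccLoopB_eq (fields : List String) (acc : Int) :
    pvAccLoopB fields acc =
      match pvParseHexA fields with
      | none => none
      | some vl =>
        if pvBadDigitA vl then none
        else some (vl.foldl (fun (a : Int) (v : Int) => (a <<< (8:Nat)) + v) acc) := by
  induction fields generalizing acc with
  | nil => simp [pvAccLoopB, pvParseHexA, pvBadDigitA]
  | cons x rest ih =>
    simp only [pvAccLoopB, pvParseHexA]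
    cases hx : PySem.Int.ofStrBase? x 16 with
    | none => simp
    | some v =>
      simp only
      by_cases hb : 255 < Int.lor v 255
      · cases hr : pvParseHexA rest with
        | none => simp [hb]
        | some vs => simp [hb, pvBadDigitA]
      · rw [if_neg hb, ih]
        cases hr : pvParseHexA rest with
        | none => simp
        | some vs => simp [pvBadDigitA, hb, List.foldl_cons]

-- A's padded positional sum = B's fold closed by one shift (lists of length 1..4)
theorem pvPad_sum_eq (vl : List Int) (h1 : 1 ≤ vl.length) (h4 : vl.length ≤ 4) :
    ((pvPadA vl).getD 0 0) <<< (24:Nat) + ((pvPadA vl).getD 1 0) <<< (16:Nat)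
      + ((pvPadA vl).getD 2 0) <<< (8:Nat) + (pvPadA vl).getD 3 0
    = (vl.foldl (fun (a : Int) (v : Int) => (a <<< (8:Nat)) + v) 0) <<< (8 * (4 - vl.length)) := by
  match vl with
  | [a] =>
    have hp : pvPadA [a] = [a, 0, 0, 0] := by simp [pvPadA]
    simp [hp, Int.shiftLeft_eq]; try ring
  | [a, b] =>
    have hp : pvPadA [a, b] = [a, b, 0, 0] := by simp [pvPadA]
    simp [hp, Int.shiftLeft_eq]; try ring
  | [a, b, c] =>
    have hp : pvPadA [a, b, c] = [a, b, c, 0] := by simp [pvPadA]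
    simp [hp, Int.shiftLeft_eq]; try ring
  | [a, b, c, d] =>
    have hp : pvPadA [a, b, c, d] = [a, b, c, d] := by simp [pvPadA]
    simp [hp, Int.shiftLeft_eq]; try ring
  | [] => simp at h1
  | _ :: _ :: _ :: _ :: _ :: _ => simp at h4; omega

-- ===== VERDICT (by name: the statement is the Claim_ definition above) =====
theorem versionNumber_spec : Claim_equal_versionNumber := by
  intro s _dom pre
  unfold Spec_versionNumber versionNumber versionNumber_alt
  by_cases hdot : PySem.Str.isIn "." s = true
  · simp only [hdot, Bool.not_true, Bool.false_eq_true, if_false]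
    set fields := (PySem.Str.split? s ".").getD [] with hf
    by_cases hlen : 1 ≤ fields.length ∧ fields.length ≤ 4
    · rw [if_neg (by simp [hlen.1, hlen.2]), pvAccLoopB_eq]
      cases hp : pvParseHexA fields with
      | none => simp
      | some vl =>
        have hl := pvParseHexA_length fields vl hp
        simp only
        rw [if_neg (by simp only [Bool.or_eq_true, decide_eq_true_eq, not_or, Nat.not_lt]; omega)]
        by_cases hb : pvBadDigitA vl = true
        · simp [hb]
        · simp only [hb, Bool.false_eq_true, if_false]
          rw [pvPad_sum_eq vl (by omega) (by omega), hl]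
    · rw [if_pos (by simp only [not_and_or, Nat.not_le, Nat.lt_iff_add_one_le] at hlen; simp only [Bool.not_eq_true', Bool.and_eq_false_iff, decide_eq_false_iff_not, Nat.not_le]; omega)]
      cases hp : pvParseHexA fields with
      | none => simp
      | some vl =>
        have hl := pvParseHexA_length fields vl hp
        simp only
        rw [if_pos (by simp only [not_and_or, Nat.not_le] at hlen; simp only [Bool.or_eq_true, decide_eq_true_eq]; omega)]
  · rw [Bool.not_eq_true] at hdot
    rw [hdot]
    simp
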